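-- pv_equiv track=rewrite | github.com/furrrow/prune | datasets/preprocess_scand_a_chop.py | _build_pairwise_map
-- ===== SOURCE A (Python) =====
-- from typing import Any, Dict, Iterable, List, MutableMapping, Optional, Tuple
--
-- def _build_pairwise_map(ranking: List[int]) -> Dict[str, int]:
--     """
--     Build pairwise winners keyed as "i_j" where i < j.
--     Winner is the path id (i or j) that appears earlier in ranking.
--     """
--     rank_pos = {path_id: idx for idx, path_id in enumerate(ranking)}
--     pairwise_map: Dict[str, int] = {}
--     ids = sorted(ranking)
--     for i, first_id in enumerate(ids):
--         for second_id in ids[i + 1 :]: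
--             winner = first_id if rank_pos[first_id] < rank_pos[second_id] else second_id
--             pairwise_map[f"{first_id}_{second_id}"] = winner
--     return pairwise_map
-- ===== SOURCE B (Python) =====
-- def _build_pairwise_map(ranking):
--     """Pairwise winners via one forward sweep over ranking itself: each element
--     pairs with every later element and overwrites the pair's entry, so the
--     surviving value is decided by last occurrences -- no rank-position dict and
--     no rank comparison needed."""
--     winners = {}
--     for i, w in enumerate(ranking):
--         for l in ranking[i + 1:]:
--             key = (w, l) if w <= l else (l, w)
--             winners[key] = w
--     return {f"{a}_{b}": win for (a, b), win in sorted(winners.items())}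
-- ===== Notes on version B (the rewrite author's own statement) =====
-- stated objective: alternative
-- what changed: Drops the rank-position dict and the sort-then-compare pass: B sweeps the ranking itself once, pairing each element with every later one and letting later writes overwrite earlier ones, so the winner is never looked up or compared; the output order is recovered by sorting the pair keys at the end.
import Mathlib
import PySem

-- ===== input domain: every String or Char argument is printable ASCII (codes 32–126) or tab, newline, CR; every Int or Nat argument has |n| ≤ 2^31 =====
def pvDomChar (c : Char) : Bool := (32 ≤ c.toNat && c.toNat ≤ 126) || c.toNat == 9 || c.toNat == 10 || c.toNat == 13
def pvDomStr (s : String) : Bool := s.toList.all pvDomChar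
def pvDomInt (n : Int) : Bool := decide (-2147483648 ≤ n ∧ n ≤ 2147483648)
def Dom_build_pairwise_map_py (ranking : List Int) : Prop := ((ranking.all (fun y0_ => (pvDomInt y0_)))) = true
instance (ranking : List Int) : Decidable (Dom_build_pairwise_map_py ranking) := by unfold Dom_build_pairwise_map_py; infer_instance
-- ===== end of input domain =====

-- B replaces A's rank-position dict and sorted double loop by a single overwrite
-- sweep over the ranking itself plus a final sort of the pair keys (alternative
-- decomposition, same asymptotic cost); return values proved identical.

-- ===== PORT A =====
def build_pairwise_map_py (ranking : List Int) : List (String × Int) :=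
  -- rank_pos = {path_id: idx for idx, path_id in enumerate(ranking)}
  let rank_pos : PySem.Dict Int Int :=
    (PySem.List.enumerate ranking 0).foldl (fun d p => d.insert p.2 p.1) PySem.Dict.empty
  -- ids = sorted(ranking)
  let ids : List Int := PySem.List.sorted ranking (fun x => x)
  -- for i, first_id in enumerate(ids): / for second_id in ids[i+1:]:
  let pairwise_map : PySem.Dict String Int :=
    (PySem.List.enumerate ids 0).foldl (fun d p =>
      (PySem.List.slice ids (some (p.1 + 1)) none).foldl (fun d second_id =>
        -- rank_pos[first_id] / rank_pos[second_id]: the keys of rank_pos are exactly the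
        -- elements of ranking = elements of ids, so Python's d[k] never raises here and
        -- the .getD default is never read (exact on every input)
        let winner := if rank_pos.getD p.2 0 < rank_pos.getD second_id 0 then p.2 else second_id
        d.insert (PySem.Int.toStr p.2 ++ "_" ++ PySem.Int.toStr second_id) winner) d)
      PySem.Dict.empty
  pairwise_map.items

-- ===== PORT B =====
def build_pairwise_map_py_alt (ranking : List Int) : List (String × Int) :=
  -- winners = {}; for i, w in enumerate(ranking): for l in ranking[i+1:]: winners[key] = w
  let winners : PySem.Dict (Int × Int) Int :=
    (PySem.List.enumerate ranking 0).foldl (fun d p =>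
      (PySem.List.slice ranking (some (p.1 + 1)) none).foldl (fun d l =>
        let key := if p.2 ≤ l then (p.2, l) else (l, p.2)
        d.insert key p.2) d)
      PySem.Dict.empty
  -- {f"{a}_{b}": win for (a, b), win in sorted(winners.items())}
  -- sorted(winners.items()) compares ((a,b),win) tuples; the keys (a,b) are unique in a
  -- dict, so Python's tuple comparison never reaches the win component: sorting by the
  -- two key components (PySem.List.sorted2) is exact
  let out : PySem.Dict String Int :=
    (PySem.List.sorted2 winners.items (fun q => q.1.1) (fun q => q.1.2)).foldl
      (fun d q => d.insert (PySem.Int.toStr q.1.1 ++ "_" ++ PySem.Int.toStr q.1.2) q.2)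
      PySem.Dict.empty
  out.items

-- ===== PRECONDITION & SPEC =====
def Spec_build_pairwise_map_py (ranking : List Int) (out : List (String × Int)) : Prop := out = build_pairwise_map_py_alt ranking
instance (ranking : List Int) (out : List (String × Int)) : Decidable (Spec_build_pairwise_map_py ranking out) := by unfold Spec_build_pairwise_map_py; infer_instance

-- ===== CLAIM (what is proved, stated in full; the proofs are below) =====
def Claim_equal_build_pairwise_map_py : Prop := ∀ (ranking : List Int), Dom_build_pairwise_map_py ranking → Spec_build_pairwise_map_py ranking (build_pairwise_map_py ranking)


-- ===== LEMMAS AND PROOFS =====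

-- ---- proof-side helper definitions ----

/-- all ordered pairs (earlier element paired with every later element) -/
def pvPairs {ν : Type} (f : Int → Int → ν) : List Int → List ν
  | [] => []
  | x :: t => t.map (f x) ++ pvPairs f t

/-- Python's `(w, l) if w <= l else (l, w)` -/
def pvSp (x y : Int) : Int × Int := if x ≤ y then (x, y) else (y, x)

/-- index of the LAST occurrence of x in r (0 if absent) — what A's rank_pos stores -/
def pvPos (r : List Int) (x : Int) : Int :=
  (PySem.List.enumerate r 0).foldl (fun acc p => if p.2 == x then p.1 else acc) 0

/-- the pairwise winner: the id whose last occurrence comes first -/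
def pvWin (r : List Int) (k : Int × Int) : Int :=
  if pvPos r k.1 < pvPos r k.2 then k.1 else k.2

/-- (a,b) is a realizable ordered id pair of r -/
def pvOcc (r : List Int) (k : Int × Int) : Prop :=
  (k.1 < k.2 ∧ k.1 ∈ r ∧ k.2 ∈ r) ∨ (k.1 = k.2 ∧ 2 ≤ r.count k.1)

/-- the string key "a_b" -/
def pvEnc (k : Int × Int) : String := PySem.Int.toStr k.1 ++ "_" ++ PySem.Int.toStr k.2

/-- last value written for key k (default z) -/
def pvLast {κ ν : Type} [BEq κ] (L : List (κ × ν)) (k : κ) (z : ν) : ν :=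
  L.foldl (fun acc p => if p.1 == k then p.2 else acc) z

/-- strict lexicographic order on pairs -/
def pvLex (k k' : Int × Int) : Prop := k.1 < k'.1 ∨ (k.1 = k'.1 ∧ k.2 < k'.2)

/-- a single Int key realizing pvLex on Dom-bounded pairs (2^33 * first + second) -/
def pvKey (q : (Int × Int) × Int) : Int := q.1.1 * 8589934592 + q.1.2

-- ---- generic Dict lemmas ----

theorem pvDict_getD_foldl {κ ν : Type} [BEq κ] [LawfulBEq κ]
    (L : List (κ × ν)) (d : PySem.Dict κ ν) (k : κ) (z : ν) :
    ((L.foldl (fun d p => d.insert p.1 p.2) d).getD k z)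
      = L.foldl (fun acc p => if p.1 == k then p.2 else acc) (d.getD k z) := by
  induction L generalizing d with
  | nil => rfl
  | cons p L ih =>
    simp only [List.foldl_cons]
    rw [ih]
    congr 1
    by_cases h : p.1 = k
    · subst h
      rw [PySem.Dict.getD_insert_self]
      simp
    · rw [PySem.Dict.getD_insert_of_ne _ _ _ (fun e => h e.symm)]
      rw [show (p.1 == k) = false from beq_eq_false_iff_ne.mpr h]
      simp

theorem pvDict_items_foldl {κ ν : Type} [BEq κ] [LawfulBEq κ]
    (L : List (κ × ν)) (d : PySem.Dict κ ν) (D : List κ) (v : κ → ν)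
    (hd : d.items = D.map (fun k => (k, v k))) :
    (L.foldl (fun d p => d.insert p.1 p.2) d).items
      = ((L.map Prod.fst).foldl PySem.Set.add D).map
          (fun k => (k, L.foldl (fun acc p => if p.1 == k then p.2 else acc) (v k))) := by
  induction L generalizing d D v with
  | nil => simpa using hd
  | cons p L ih =>
    simp only [List.foldl_cons, List.map_cons]
    have hkeys : d.keys = D := by
      show d.items.map Prod.fst = D
      simp [hd, Function.comp_def]
    by_cases hm : p.1 ∈ D
    · have hc : d.contains p.1 = true := by
        rw [PySem.Dict.contains_iff_mem_keys, hkeys]; exact hm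
      have hd' : (d.insert p.1 p.2).items
          = D.map (fun k => (k, if p.1 == k then p.2 else v k)) := by
        rw [PySem.Dict.items_insert_of_contains d p.2 hc, hd, List.map_map]
        apply List.map_congr_left
        intro k hk
        simp only [Function.comp]
        by_cases hkp : k = p.1
        · subst hkp; simp
        · rw [show (k == p.1) = false from beq_eq_false_iff_ne.mpr hkp,
            show (p.1 == k) = false from beq_eq_false_iff_ne.mpr (fun e => hkp e.symm)]
          simp
      rw [ih (d.insert p.1 p.2) D _ hd']
      rw [show PySem.Set.add D p.1 = D from PySem.Set.add_of_mem hm]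
    · have hc : d.contains p.1 = false := by
        rw [← Bool.not_eq_true, PySem.Dict.contains_iff_mem_keys, hkeys]; exact hm
      have hd' : (d.insert p.1 p.2).items
          = (D ++ [p.1]).map (fun k => (k, if p.1 == k then p.2 else v k)) := by
        rw [PySem.Dict.items_insert_of_not_contains d p.2 hc, hd, List.map_append]
        congr 1
        · apply List.map_congr_left
          intro k hk
          rw [show (p.1 == k) = false from
            beq_eq_false_iff_ne.mpr (fun e => hm (e ▸ hk))]
          simp
        · simp
      rw [ih (d.insert p.1 p.2) (D ++ [p.1]) _ hd']
      rw [show PySem.Set.add D p.1 = D ++ [p.1] from PySem.Set.add_of_not_mem hm]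

theorem pvDict_items_foldl_map {κ κ' ν : Type} [BEq κ] [LawfulBEq κ] [BEq κ'] [LawfulBEq κ']
    (f : κ → κ') (hf : Function.Injective f)
    (L : List (κ × ν)) (d : PySem.Dict κ ν) (d' : PySem.Dict κ' ν)
    (hd : d'.items = d.items.map (fun q => (f q.1, q.2))) :
    (L.foldl (fun d p => d.insert (f p.1) p.2) d').items
      = ((L.foldl (fun d p => d.insert p.1 p.2) d).items).map (fun q => (f q.1, q.2)) := by
  induction L generalizing d d' with
  | nil => simpa using hd
  | cons p L ih =>
    simp only [List.foldl_cons]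
    have hkeys : d'.keys = d.keys.map f := by
      show d'.items.map Prod.fst = (d.items.map Prod.fst).map f
      rw [hd, List.map_map, List.map_map]
      rfl
    apply ih
    by_cases hc : d.contains p.1 = true
    · have hc' : d'.contains (f p.1) = true := by
        rw [PySem.Dict.contains_iff_mem_keys, hkeys]
        exact List.mem_map_of_mem ((PySem.Dict.contains_iff_mem_keys d p.1).mp hc)
      rw [PySem.Dict.items_insert_of_contains d' p.2 hc',
        PySem.Dict.items_insert_of_contains d p.2 hc, hd, List.map_map, List.map_map]
      apply List.map_congr_left
      intro q hq
      simp only [Function.comp]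
      by_cases hqp : q.1 = p.1
      · rw [show (q.1 == p.1) = true by simpa using hqp,
          show (f q.1 == f p.1) = true by simp [hqp]]
        simp
      · rw [show (q.1 == p.1) = false from beq_eq_false_iff_ne.mpr hqp,
          show (f q.1 == f p.1) = false from
            beq_eq_false_iff_ne.mpr (fun e => hqp (hf e))]
        simp
    · have hcf : d.contains p.1 = false := by simpa using hc
      have hc' : d'.contains (f p.1) = false := by
        rw [← Bool.not_eq_true, PySem.Dict.contains_iff_mem_keys, hkeys]
        intro hmem
        rw [List.mem_map_of_injective hf] at hmem
        rw [← PySem.Dict.contains_iff_mem_keys] at hmem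
        simp [hcf] at hmem
      rw [PySem.Dict.items_insert_of_not_contains d' p.2 hc',
        PySem.Dict.items_insert_of_not_contains d p.2 hcf, hd, List.map_append]
      rfl

-- ---- Set lemmas ----

theorem pvSet_foldl_add {α : Type} [BEq α] [LawfulBEq α] (v s : List α) :
    v.foldl PySem.Set.add s = s ++ (PySem.Set.ofList v).filter (fun y => !s.contains y) := by
  induction v generalizing s with
  | nil => simp [PySem.Set.ofList]
  | cons x v ih =>
    have hof : PySem.Set.ofList (x :: v)
        = [x] ++ (PySem.Set.ofList v).filter (fun y => !([x] : List α).contains y) := by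
      rw [PySem.Set.ofList_eq_foldl]
      simp only [List.foldl_cons]
      rw [show PySem.Set.add ([] : PySem.Set α) x = [x] from rfl]
      exact ih [x]
    simp only [List.foldl_cons]
    by_cases hx : x ∈ s
    · rw [PySem.Set.add_of_mem hx, ih, hof]
      congr 1
      rw [List.filter_append, List.filter_filter]
      have hxc : (!s.contains x) = false := by
        simp [hx]
      simp only [List.filter_cons, hxc, List.filter_nil, Bool.false_eq_true, if_false,
        List.nil_append]
      apply List.filter_congr
      intro y hy
      by_cases hyx : y = x
      · subst hyx; simp [hx]
      · simp [hyx]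
    · rw [PySem.Set.add_of_not_mem hx, ih, hof]
      rw [List.filter_append, List.filter_filter, List.append_assoc]
      congr 1
      have hxc : (!s.contains x) = true := by
        simp [hx]
      simp only [List.filter_cons, hxc, List.filter_nil, if_true]
      congr 1
      apply List.filter_congr
      intro y hy
      by_cases hyx : y = x
      · subst hyx; simp [hx]
      · simp [hyx, or_comm]

theorem pvSet_ofList_cons {α : Type} [BEq α] [LawfulBEq α] (x : α) (v : List α) :
    PySem.Set.ofList (x :: v) = x :: (PySem.Set.ofList v).filter (fun y => !(y == x)) := by
  have h := pvSet_foldl_add v [x]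
  rw [PySem.Set.ofList_eq_foldl]
  simp only [List.foldl_cons]
  rw [show PySem.Set.add ([] : PySem.Set α) x = [x] from rfl, h]
  simp only [List.singleton_append, List.cons.injEq, true_and]
  apply List.filter_congr
  intro y hy
  simp [eq_comm]

theorem pvSet_ofList_sublist {α : Type} [BEq α] [LawfulBEq α] (v : List α) :
    (PySem.Set.ofList v).Sublist v := by
  induction v with
  | nil => simp [PySem.Set.ofList]
  | cons x v ih =>
    rw [pvSet_ofList_cons]
    exact List.Sublist.cons₂ x (List.Sublist.trans List.filter_sublist ih)

theorem pvSet_ofList_map {α β : Type} [BEq α] [LawfulBEq α] [BEq β] [LawfulBEq β]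
    (f : α → β) (hf : Function.Injective f) (v : List α) :
    PySem.Set.ofList (v.map f) = (PySem.Set.ofList v).map f := by
  induction v with
  | nil => simp [PySem.Set.ofList]
  | cons x v ih =>
    rw [List.map_cons, pvSet_ofList_cons, pvSet_ofList_cons, ih, List.map_cons,
      List.filter_map]
    congr 1
    congr 1
    apply List.filter_congr
    intro y hy
    simp only [Function.comp]
    by_cases hyx : y = x
    · subst hyx; simp
    · have : ¬ f y = f x := fun h => hyx (hf h)
      simp [hyx, this]

-- ---- pvPairs lemmas ----

theorem pvPairs_map {ν ν' : Type} (f : Int → Int → ν) (g : ν → ν') (t : List Int) :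
    (pvPairs f t).map g = pvPairs (fun a b => g (f a b)) t := by
  induction t with
  | nil => rfl
  | cons x t ih => simp [pvPairs, List.map_append, List.map_map, ih, Function.comp]

theorem pvPairs_mem {ν : Type} (f : Int → Int → ν) (t : List Int) :
    ∀ p ∈ pvPairs f t, ∃ a b, a ∈ t ∧ b ∈ t ∧ p = f a b := by
  induction t with
  | nil => intro p hp; simp [pvPairs] at hp
  | cons x t ih =>
    intro p hp
    simp only [pvPairs, List.mem_append, List.mem_map] at hp
    rcases hp with ⟨b, hb, rfl⟩ | hp
    · exact ⟨x, b, List.mem_cons_self .., List.mem_cons_of_mem _ hb, rfl⟩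
    · obtain ⟨a, b, ha, hb, rfl⟩ := ih p hp
      exact ⟨a, b, List.mem_cons_of_mem _ ha, List.mem_cons_of_mem _ hb, rfl⟩

theorem pvFlat {ν : Type} (f : Int → Int → ν) :
    ∀ (t : List Int) (u : List Int) (s : Nat), u.drop s = t →
    (PySem.List.enumerate t (s : Int)).flatMap
        (fun p => (PySem.List.slice u (some (p.1 + 1)) none).map (f p.2)) = pvPairs f t := by
  intro t
  induction t with
  | nil => intro u s h; simp [PySem.List.enumerate_nil, pvPairs]
  | cons x t ih =>
    intro u s h
    rw [PySem.List.enumerate_cons, List.flatMap_cons]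
    have hdrop : u.drop (s + 1) = t := by
      rw [show s + 1 = s + 1 from rfl, ← List.drop_drop, h, List.drop_one, List.tail_cons]
    have hslice : PySem.List.slice u (some ((s : Int) + 1)) none = t := by
      rw [show ((s : Int) + 1) = ((s + 1 : Nat) : Int) by push_cast; ring]
      rw [PySem.List.slice_from_natCast, hdrop]
    rw [hslice]
    have hrest := ih u (s + 1) hdrop
    rw [show ((s : Int) + 1) = ((s + 1 : Nat) : Int) by push_cast; ring, hrest]
    rfl

theorem pvNested_foldl {κ ν : Type} [BEq κ] (X : List Int) (e : Int → Int → κ × ν)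
    (init : PySem.Dict κ ν) :
    (PySem.List.enumerate X 0).foldl (fun d p =>
        (PySem.List.slice X (some (p.1 + 1)) none).foldl
          (fun d b => d.insert (e p.2 b).1 (e p.2 b).2) d) init
      = (pvPairs e X).foldl (fun d p => d.insert p.1 p.2) init := by
  rw [← pvFlat e X X 0 (by simp), List.foldl_flatMap]
  simp only [List.foldl_map]
  norm_num

-- ---- pvPos lemmas ----

theorem pvPos_aux (x : Int) : ∀ (t : List Int) (s z : Int),
    (PySem.List.enumerate t s).foldl (fun acc p => if p.2 == x then p.1 else acc) z
      = if x ∈ t then s + pvPos t x else z := by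
  intro t
  induction t with
  | nil => intro s z; simp [PySem.List.enumerate_nil]
  | cons y t ih =>
    intro s z
    have hpos : pvPos (y :: t) x
        = if x ∈ t then 1 + pvPos t x else (if y == x then (0:Int) else 0) := by
      show (PySem.List.enumerate (y :: t) 0).foldl _ _ = _
      rw [PySem.List.enumerate_cons]
      simp only [List.foldl_cons]
      rw [ih]
      norm_num
    rw [PySem.List.enumerate_cons]
    simp only [List.foldl_cons]
    rw [ih, hpos]
    simp only [List.mem_cons, beq_iff_eq]
    by_cases hxt : x ∈ t <;> by_cases hyx : y = x <;> simp [hxt, hyx] <;> omega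

theorem pvPos_cons (y x : Int) (t : List Int) :
    pvPos (y :: t) x = if x ∈ t then 1 + pvPos t x else (if y = x then 0 else 0) := by
  have hpos : pvPos (y :: t) x
      = if x ∈ t then 1 + pvPos t x else (if y == x then (0:Int) else 0) := by
    show (PySem.List.enumerate (y :: t) 0).foldl _ _ = _
    rw [PySem.List.enumerate_cons]
    simp only [List.foldl_cons]
    rw [pvPos_aux x t]
    norm_num
  rw [hpos]
  simp only [beq_iff_eq]

theorem pvPos_nonneg (t : List Int) (x : Int) : 0 ≤ pvPos t x := by
  induction t with
  | nil => simp [pvPos, PySem.List.enumerate_nil]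
  | cons y t ih =>
    rw [pvPos_cons]
    by_cases hxt : x ∈ t <;> by_cases hyx : y = x <;> simp [hxt, hyx] <;> omega

-- ---- last-write lemmas ----

theorem pvLast_not_mem {κ ν : Type} [BEq κ] [LawfulBEq κ] (L : List (κ × ν)) (k : κ) (z : ν)
    (h : k ∉ L.map Prod.fst) : pvLast L k z = z := by
  induction L generalizing z with
  | nil => rfl
  | cons p L ih =>
    simp only [List.map_cons, List.mem_cons, not_or] at h
    simp only [pvLast, List.foldl_cons] at ih ⊢
    rw [show (p.1 == k) = false from beq_eq_false_iff_ne.mpr (fun e => h.1 e.symm)]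
    simp only [Bool.false_eq_true, if_false]
    exact ih _ h.2

theorem pvLast_valfun {κ ν : Type} [BEq κ] [LawfulBEq κ] (L : List (κ × ν)) (F : κ → ν)
    (hL : ∀ p ∈ L, p.2 = F p.1) (k : κ) (z : ν) (hk : k ∈ L.map Prod.fst) :
    pvLast L k z = F k := by
  induction L generalizing z with
  | nil => simp at hk
  | cons p L ih =>
    simp only [List.map_cons, List.mem_cons] at hk
    simp only [pvLast, List.foldl_cons] at ih ⊢
    by_cases hm : k ∈ L.map Prod.fst
    · exact ih (fun q hq => hL q (List.mem_cons_of_mem _ hq)) _ hm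
    · have hk1 : p.1 = k := by
        rcases hk with h1 | h2
        · exact h1.symm
        · exact absurd h2 hm
      rw [show (p.1 == k) = true by simpa using hk1]
      simp only [if_true]
      have hv : p.2 = F k := by rw [← hk1]; exact hL p (List.mem_cons_self ..)
      rw [hv]
      exact pvLast_not_mem L k (F k) hm

theorem pvLast_default {κ ν : Type} [BEq κ] [LawfulBEq κ] (L : List (κ × ν)) (k : κ)
    (hk : k ∈ L.map Prod.fst) (z z' : ν) : pvLast L k z = pvLast L k z' := by
  induction L generalizing z z' with
  | nil => simp at hk
  | cons p L ih =>
    simp only [List.map_cons, List.mem_cons] at hk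
    simp only [pvLast, List.foldl_cons] at ih ⊢
    by_cases hm : k ∈ L.map Prod.fst
    · exact ih hm _ _
    · have hk1 : p.1 = k := by
        rcases hk with h1 | h2
        · exact h1.symm
        · exact absurd h2 hm
      rw [show (p.1 == k) = true by simpa using hk1]
      simp

theorem pvLast_append {κ ν : Type} [BEq κ] (L M : List (κ × ν)) (k : κ) (z : ν) :
    pvLast (L ++ M) k z = pvLast M k (pvLast L k z) := by
  simp [pvLast, List.foldl_append]

-- ---- membership characterizations ----

theorem pvSet_ofList_append {α : Type} [BEq α] [LawfulBEq α] (u v : List α) :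
    PySem.Set.ofList (u ++ v)
      = PySem.Set.ofList u ++ (PySem.Set.ofList v).filter
          (fun y => !(PySem.Set.ofList u).contains y) := by
  rw [PySem.Set.ofList_eq_foldl, List.foldl_append, ← PySem.Set.ofList_eq_foldl]
  exact pvSet_foldl_add v (PySem.Set.ofList u)

theorem pvOcc_cons_of {t : List Int} {k : Int × Int} (w : Int) (h : pvOcc t k) :
    pvOcc (w :: t) k := by
  rcases h with ⟨hab, ha, hb⟩ | ⟨hab, hcnt⟩
  · exact Or.inl ⟨hab, List.mem_cons_of_mem _ ha, List.mem_cons_of_mem _ hb⟩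
  · refine Or.inr ⟨hab, ?_⟩
    rw [List.count_cons]
    omega

theorem pvMem_pairs_sp (t : List Int) (k : Int × Int) :
    k ∈ pvPairs pvSp t ↔ pvOcc t k := by
  obtain ⟨a, b⟩ := k
  induction t with
  | nil => simp [pvPairs, pvOcc]
  | cons w t ih =>
    simp only [pvPairs, List.mem_append, List.mem_map, ih]
    constructor
    · rintro (⟨l, hl, hsp⟩ | hocc)
      · unfold pvSp at hsp
        by_cases hwl : w ≤ l
        · rw [if_pos hwl] at hsp
          have ha : w = a := congrArg Prod.fst hsp
          have hb : l = b := congrArg Prod.snd hsp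
          subst ha; subst hb
          rcases eq_or_lt_of_le hwl with heq | hlt
          · subst heq
            refine Or.inr ⟨rfl, ?_⟩
            have h1 : 0 < t.count w := List.count_pos_iff.mpr hl
            dsimp only
            rw [List.count_cons, beq_self_eq_true, if_pos rfl]
            omega
          · exact Or.inl ⟨hlt, List.mem_cons_self .., List.mem_cons_of_mem _ hl⟩
        · rw [if_neg hwl] at hsp
          have ha : l = a := congrArg Prod.fst hsp
          have hb : w = b := congrArg Prod.snd hsp
          subst ha; subst hb
          exact Or.inl ⟨by omega, List.mem_cons_of_mem _ hl, List.mem_cons_self ..⟩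
      · exact pvOcc_cons_of w hocc
    · rintro (⟨hab, ha, hb⟩ | ⟨hab, hcnt⟩)
      · rcases List.mem_cons.mp ha with rfl | hat
        · rcases List.mem_cons.mp hb with hbw | hbt
          · omega
          · refine Or.inl ⟨b, hbt, ?_⟩
            unfold pvSp
            rw [if_pos (le_of_lt hab)]
        · rcases List.mem_cons.mp hb with rfl | hbt
          · refine Or.inl ⟨a, hat, ?_⟩
            unfold pvSp
            rw [if_neg (by omega)]
          · exact Or.inr (Or.inl ⟨hab, hat, hbt⟩)
      · dsimp only at hab hcnt ⊢
        subst hab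
        by_cases haw : w = a
        · subst haw
          rw [List.count_cons, beq_self_eq_true, if_pos rfl] at hcnt
          have hat : w ∈ t := List.count_pos_iff.mp (by omega)
          refine Or.inl ⟨w, hat, ?_⟩
          unfold pvSp
          rw [if_pos le_rfl]
        · rw [List.count_cons, show (w == a) = false from beq_eq_false_iff_ne.mpr haw,
            if_neg (by decide)] at hcnt
          exact Or.inr (Or.inr ⟨rfl, by omega⟩)

theorem pvMem_pairs_id (t : List Int) (ht : t.Pairwise (· ≤ ·)) (k : Int × Int) :
    k ∈ pvPairs (fun a b => (a, b)) t ↔ pvOcc t k := by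
  obtain ⟨a, b⟩ := k
  revert ht
  induction t with
  | nil => intro ht; simp [pvPairs, pvOcc]
  | cons w t ih =>
    intro ht
    obtain ⟨hw, ht'⟩ := List.pairwise_cons.mp ht
    simp only [pvPairs, List.mem_append, List.mem_map, ih ht']
    constructor
    · rintro (⟨l, hl, hsp⟩ | hocc)
      · have ha : w = a := congrArg Prod.fst hsp
        have hb : l = b := congrArg Prod.snd hsp
        subst ha; subst hb
        rcases eq_or_lt_of_le (hw _ hl) with heq | hlt
        · subst heq
          refine Or.inr ⟨rfl, ?_⟩
          have h1 : 0 < t.count w := List.count_pos_iff.mpr hl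
          dsimp only
          rw [List.count_cons, beq_self_eq_true, if_pos rfl]
          omega
        · exact Or.inl ⟨hlt, List.mem_cons_self .., List.mem_cons_of_mem _ hl⟩
      · exact pvOcc_cons_of w hocc
    · rintro (⟨hab, ha, hb⟩ | ⟨hab, hcnt⟩)
      · rcases List.mem_cons.mp ha with rfl | hat
        · rcases List.mem_cons.mp hb with hbw | hbt
          · omega
          · exact Or.inl ⟨b, hbt, rfl⟩
        · rcases List.mem_cons.mp hb with rfl | hbt
          · have := hw a hat
            omega
          · exact Or.inr (Or.inl ⟨hab, hat, hbt⟩)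
      · dsimp only at hab hcnt ⊢
        subst hab
        by_cases haw : w = a
        · subst haw
          rw [List.count_cons, beq_self_eq_true, if_pos rfl] at hcnt
          have hat : w ∈ t := List.count_pos_iff.mp (by omega)
          exact Or.inl ⟨w, hat, rfl⟩
        · rw [List.count_cons, show (w == a) = false from beq_eq_false_iff_ne.mpr haw,
            if_neg (by decide)] at hcnt
          exact Or.inr (Or.inr ⟨rfl, by omega⟩)

theorem pvOcc_perm {S r : List Int} (h : S.Perm r) (k : Int × Int) :
    pvOcc S k ↔ pvOcc r k := by
  unfold pvOcc
  rw [h.mem_iff, h.mem_iff, h.count_eq]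

-- ---- the last-write-wins argument ----

theorem pvLast_J (r : List Int) (k : Int × Int) (h : pvOcc r k) :
    pvLast (pvPairs (fun w l => (pvSp w l, w)) r) k 0 = pvWin r k := by
  revert k h
  induction r with
  | nil =>
    intro k h
    rcases h with ⟨_, ha, _⟩ | ⟨_, hcnt⟩
    · simp at ha
    · simp at hcnt
  | cons w t ih =>
    intro k hocc
    simp only [pvPairs]
    rw [pvLast_append]
    have hchunkval : ∀ p ∈ t.map (fun l => (pvSp w l, w)), p.2 = (fun _ => w) p.1 := by
      intro p hp
      obtain ⟨l, _, rfl⟩ := List.mem_map.mp hp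
      rfl
    have hchunkkeys : (t.map (fun l => (pvSp w l, w))).map Prod.fst = t.map (pvSp w) := by
      rw [List.map_map]; rfl
    by_cases hOt : pvOcc t k
    · have hkmem : k ∈ (pvPairs (fun w l => (pvSp w l, w)) t).map Prod.fst := by
        rw [pvPairs_map]
        exact (pvMem_pairs_sp t k).mpr hOt
      rw [pvLast_default _ k hkmem _ 0, ih k hOt]
      have h1 : k.1 ∈ t ∧ k.2 ∈ t := by
        rcases hOt with ⟨_, ha, hb⟩ | ⟨hab, hcnt⟩
        · exact ⟨ha, hb⟩
        · have h := List.count_pos_iff.mp (show 0 < t.count k.1 by omega)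
          exact ⟨h, hab ▸ h⟩
      unfold pvWin
      rw [pvPos_cons, pvPos_cons, if_pos h1.1, if_pos h1.2]
      by_cases hlt : pvPos t k.1 < pvPos t k.2
      · rw [if_pos hlt, if_pos (by omega)]
      · rw [if_neg hlt, if_neg (by omega)]
    · have hnm : k ∉ (pvPairs (fun w l => (pvSp w l, w)) t).map Prod.fst := by
        rw [pvPairs_map]
        exact fun hm => hOt ((pvMem_pairs_sp t k).mp hm)
      rw [pvLast_not_mem _ _ _ hnm]
      obtain ⟨a, b⟩ := k
      rcases hocc with ⟨hab, ha, hb⟩ | ⟨hab, hcnt⟩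
      · have hnboth : ¬(a ∈ t ∧ b ∈ t) := fun hh => hOt (Or.inl ⟨hab, hh.1, hh.2⟩)
        rcases List.mem_cons.mp ha with rfl | hat
        · -- a = w : the head wins
          rcases List.mem_cons.mp hb with hbw | hbt
          · omega
          · have hwt : a ∉ t := fun hh => hnboth ⟨hh, hbt⟩
            have hkey : (a, b) ∈ (t.map (fun l => (pvSp a l, a))).map Prod.fst := by
              rw [hchunkkeys]
              refine List.mem_map.mpr ⟨b, hbt, ?_⟩
              unfold pvSp
              rw [if_pos (le_of_lt hab)]
            rw [pvLast_valfun _ (fun _ => a) hchunkval _ _ hkey]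
            unfold pvWin
            dsimp only
            rw [pvPos_cons, pvPos_cons, if_neg hwt, if_pos hbt, if_pos rfl]
            have := pvPos_nonneg t b
            rw [if_pos (by omega)]
        · rcases List.mem_cons.mp hb with rfl | hbt
          · -- b = w : w loses to the earlier a
            have hwt : b ∉ t := fun hh => hnboth ⟨hat, hh⟩
            have hkey : (a, b) ∈ (t.map (fun l => (pvSp b l, b))).map Prod.fst := by
              rw [hchunkkeys]
              refine List.mem_map.mpr ⟨a, hat, ?_⟩
              unfold pvSp
              rw [if_neg (by omega)]
            rw [pvLast_valfun _ (fun _ => b) hchunkval _ _ hkey]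
            unfold pvWin
            dsimp only
            rw [pvPos_cons, pvPos_cons, if_pos hat, if_neg hwt, if_pos rfl]
            have := pvPos_nonneg t a
            rw [if_neg (by omega)]
          · exact absurd ⟨hat, hbt⟩ hnboth
      · -- a = b, duplicated id
        dsimp only at hab hcnt
        subst hab
        have hnc : ¬ 2 ≤ t.count a := fun hh => hOt (Or.inr ⟨rfl, hh⟩)
        have haw : w = a := by
          by_contra hne
          rw [List.count_cons, show (w == a) = false from beq_eq_false_iff_ne.mpr hne,
            if_neg (by decide)] at hcnt
          omega
        subst haw
        rw [List.count_cons, beq_self_eq_true, if_pos rfl] at hcnt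
        have hat : w ∈ t := List.count_pos_iff.mp (by omega)
        have hkey : (w, w) ∈ (t.map (fun l => (pvSp w l, w))).map Prod.fst := by
          rw [hchunkkeys]
          refine List.mem_map.mpr ⟨w, hat, ?_⟩
          unfold pvSp
          rw [if_pos le_rfl]
        rw [pvLast_valfun _ (fun _ => w) hchunkval _ _ hkey]
        unfold pvWin
        simp

-- ---- pairwise order of A's key list ----

theorem pvOfList_pairwise_lt (t : List Int) (ht : t.Pairwise (· ≤ ·)) :
    (PySem.Set.ofList t).Pairwise (· < ·) := by
  have hsub := pvSet_ofList_sublist t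
  have hle : (PySem.Set.ofList t).Pairwise (· ≤ ·) := ht.sublist hsub
  have hnd : (PySem.Set.ofList t).Nodup := PySem.Set.nodup_ofList t
  exact (hle.and hnd).imp (fun h => lt_of_le_of_ne h.1 h.2)

theorem pvKA_pairwise (S : List Int) (hS : S.Pairwise (· ≤ ·)) :
    (PySem.Set.ofList (pvPairs (fun a b => (a, b)) S)).Pairwise pvLex := by
  revert hS
  induction S with
  | nil => intro _; simp [pvPairs, PySem.Set.ofList]
  | cons s t ih =>
    intro hS
    obtain ⟨hw, ht'⟩ := List.pairwise_cons.mp hS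
    show ((PySem.Set.ofList (t.map (fun b => (s, b)) ++ pvPairs (fun a b => (a, b)) t))).Pairwise pvLex
    rw [pvSet_ofList_append]
    rw [pvSet_ofList_map (fun b => (s, b)) (fun x y h => by simpa using congrArg Prod.snd h) t]
    rw [List.pairwise_append]
    refine ⟨?_, ?_, ?_⟩
    · rw [List.pairwise_map]
      exact (pvOfList_pairwise_lt t ht').imp (fun h => Or.inr ⟨rfl, h⟩)
    · exact (ih ht').filter _
    · intro x hx y hy
      obtain ⟨b, hb, rfl⟩ := List.mem_map.mp hx
      obtain ⟨hy1, hy2⟩ := List.mem_filter.mp hy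
      obtain ⟨a', b', ha', hb', rfl⟩ :=
        pvPairs_mem _ t y ((PySem.Set.mem_ofList _ _).mp hy1)
      rcases eq_or_lt_of_le (hw a' ha') with heq | hlt
      · exfalso
        have : (a', b') ∈ (PySem.Set.ofList t).map (fun b => (s, b)) := by
          subst heq
          exact List.mem_map.mpr ⟨b', (PySem.Set.mem_ofList _ _).mpr hb', rfl⟩
        rw [Bool.not_eq_eq_eq_not, Bool.not_true, ← Bool.not_eq_true, PySem.Set.contains_iff] at hy2
        exact hy2 this
      · exact Or.inl hlt

-- ---- encoding injectivity ----

theorem pvDigits_mem (n : Nat) : ∀ c ∈ Nat.toDigits 10 n, ∃ d, d < 10 ∧ c = Nat.digitChar d := by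
  induction n using Nat.strong_induction_on with
  | _ n ih =>
    intro c hc
    rw [Nat.toDigits_eq_if (by norm_num)] at hc
    by_cases h : n < 10
    · rw [if_pos h] at hc
      simp at hc
      exact ⟨n, h, hc⟩
    · rw [if_neg h] at hc
      rcases List.mem_append.mp hc with h1 | h2
      · exact ih (n / 10) (by omega) c h1
      · simp at h2
        exact ⟨n % 10, Nat.mod_lt _ (by norm_num), h2⟩

theorem pvDigits_ne_nil (n : Nat) : Nat.toDigits 10 n ≠ [] := by
  rw [Nat.toDigits_eq_if (by norm_num)]
  by_cases h : n < 10
  · simp [h]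
  · simp [h]

theorem pvDigits_no_special (n : Nat) : ∀ c ∈ Nat.toDigits 10 n, c ≠ '-' ∧ c ≠ '_' := by
  intro c hc
  obtain ⟨d, hd, rfl⟩ := pvDigits_mem n c hc
  interval_cases d <;> exact ⟨by decide, by decide⟩

theorem pvDigitChar_inj (d e : Nat) (hd : d < 10) (he : e < 10)
    (h : Nat.digitChar d = Nat.digitChar e) : d = e := by
  interval_cases d <;> interval_cases e <;> revert h <;> decide

theorem pvDigits_inj : ∀ (n m : Nat), Nat.toDigits 10 n = Nat.toDigits 10 m → n = m := by
  intro n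
  induction n using Nat.strong_induction_on with
  | _ n ih =>
    intro m h
    by_cases hn : n < 10 <;> by_cases hm : m < 10
    · rw [Nat.toDigits_of_lt_base hn, Nat.toDigits_of_lt_base hm] at h
      have h' : Nat.digitChar n = Nat.digitChar m := by simpa using h
      exact pvDigitChar_inj n m hn hm h'
    · exfalso
      rw [Nat.toDigits_of_lt_base hn,
        Nat.toDigits_of_base_le (by norm_num) (by omega)] at h
      have hlen := congrArg List.length h
      simp at hlen
      exact pvDigits_ne_nil (m / 10) hlen
    · exfalso
      rw [Nat.toDigits_of_lt_base hm,
        Nat.toDigits_of_base_le (by norm_num) (by omega)] at h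
      have hlen := congrArg List.length h
      simp at hlen
      exact pvDigits_ne_nil (n / 10) hlen
    · rw [Nat.toDigits_of_base_le (n := n) (by norm_num) (by omega),
        Nat.toDigits_of_base_le (n := m) (by norm_num) (by omega)] at h
      obtain ⟨h1, h2⟩ := List.append_inj' h (by simp)
      have hd : n % 10 = m % 10 := by
        have h2' : Nat.digitChar (n % 10) = Nat.digitChar (m % 10) := by simpa using h2
        exact pvDigitChar_inj _ _ (Nat.mod_lt _ (by norm_num)) (Nat.mod_lt _ (by norm_num)) h2'
      have hq : n / 10 = m / 10 := ih (n / 10) (by omega) (m / 10) h1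
      omega

theorem pvToChars_inj : Function.Injective PySem.Int.toChars := by
  intro n m h
  unfold PySem.Int.toChars at h
  by_cases hn : n < 0 <;> by_cases hm : m < 0
  · rw [if_pos hn, if_pos hm] at h
    simp only [List.cons.injEq, true_and] at h
    have := pvDigits_inj _ _ h
    omega
  · exfalso
    rw [if_pos hn, if_neg hm] at h
    have hmem : '-' ∈ Nat.toDigits 10 m.toNat := by
      rw [← h]; exact List.mem_cons_self ..
    exact (pvDigits_no_special _ _ hmem).1 rfl
  · exfalso
    rw [if_neg hn, if_pos hm] at h
    have hmem : '-' ∈ Nat.toDigits 10 n.toNat := by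
      rw [h]; exact List.mem_cons_self ..
    exact (pvDigits_no_special _ _ hmem).1 rfl
  · rw [if_neg hn, if_neg hm] at h
    have := pvDigits_inj _ _ h
    omega

theorem pvToChars_no_underscore (n : Int) : '_' ∉ PySem.Int.toChars n := by
  unfold PySem.Int.toChars
  by_cases hn : n < 0
  · rw [if_pos hn]
    intro hc
    rcases List.mem_cons.mp hc with h | h
    · exact absurd h (by decide)
    · exact (pvDigits_no_special _ _ h).2 rfl
  · rw [if_neg hn]
    intro hc
    exact (pvDigits_no_special _ _ hc).2 rfl

theorem pvSplit_underscore {s1 t1 s2 t2 : List Char}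
    (h : s1 ++ '_' :: t1 = s2 ++ '_' :: t2) (h1 : '_' ∉ s1) (h2 : '_' ∉ s2) :
    s1 = s2 ∧ t1 = t2 := by
  induction s1 generalizing s2 with
  | nil =>
    cases s2 with
    | nil => simpa using h
    | cons c s2 =>
      exfalso
      simp only [List.nil_append, List.cons_append, List.cons.injEq] at h
      exact h2 (h.1 ▸ List.mem_cons_self ..)
  | cons c s1 ih =>
    cases s2 with
    | nil =>
      exfalso
      simp only [List.nil_append, List.cons_append, List.cons.injEq] at h
      exact h1 (h.1.symm ▸ List.mem_cons_self ..)
    | cons c' s2 =>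
      simp only [List.cons_append, List.cons.injEq] at h
      obtain ⟨rfl, h'⟩ := h
      have hrec := ih h' (fun hh => h1 (List.mem_cons_of_mem _ hh))
        (fun hh => h2 (List.mem_cons_of_mem _ hh))
      exact ⟨by rw [hrec.1], hrec.2⟩

theorem pvEnc_inj : Function.Injective pvEnc := by
  intro k k' h
  unfold pvEnc at h
  have h' : (PySem.Int.toStr k.1 ++ "_" ++ PySem.Int.toStr k.2).toList
      = (PySem.Int.toStr k'.1 ++ "_" ++ PySem.Int.toStr k'.2).toList := by rw [h]
  simp only [String.toList_append, PySem.Int.toList_toStr] at h'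
  rw [show ("_" : String).toList = ['_'] from rfl, List.append_assoc, List.append_assoc,
    List.singleton_append, List.singleton_append] at h'
  obtain ⟨h1, h2⟩ := pvSplit_underscore h' (pvToChars_no_underscore _)
    (pvToChars_no_underscore _)
  exact Prod.ext (pvToChars_inj h1) (pvToChars_inj h2)

-- ---- insertion-sort lemmas ----

theorem pvInsertBy_congr {α : Type} (b₁ b₂ : α → α → Bool) (x : α) (ys : List α)
    (h : ∀ y ∈ ys, b₁ x y = b₂ x y) :
    PySem.List.insertBy b₁ x ys = PySem.List.insertBy b₂ x ys := by
  induction ys with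
  | nil => rfl
  | cons y ys ih =>
    rw [PySem.List.insertBy.eq_2, PySem.List.insertBy.eq_2, h y (List.mem_cons_self ..),
      ih (fun z hz => h z (List.mem_cons_of_mem _ hz))]

theorem pvFoldl_insertBy_congr {α : Type} (b₁ b₂ : α → α → Bool) (P : α → Prop)
    (h : ∀ a b, P a → P b → b₁ a b = b₂ a b) :
    ∀ (xs acc : List α), (∀ x ∈ xs, P x) → (∀ x ∈ acc, P x) →
    xs.foldl (fun acc x => PySem.List.insertBy b₁ x acc) acc
      = xs.foldl (fun acc x => PySem.List.insertBy b₂ x acc) acc := by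
  intro xs
  induction xs with
  | nil => intro acc _ _; rfl
  | cons x xs ih =>
    intro acc hxs hacc
    simp only [List.foldl_cons]
    rw [pvInsertBy_congr b₁ b₂ x acc
      (fun y hy => h x y (hxs x (List.mem_cons_self ..)) (hacc y hy))]
    exact ih _ (fun z hz => hxs z (List.mem_cons_of_mem _ hz))
      (fun z hz => by
        rcases (PySem.List.insertBy_mem_iff b₂ x z acc).mp hz with rfl | hz'
        · exact hxs z (List.mem_cons_self ..)
        · exact hacc z hz')

theorem pvSorted2_eq_sorted (xs : List ((Int × Int) × Int))
    (hb : ∀ q ∈ xs, (-2147483648 ≤ q.1.1 ∧ q.1.1 ≤ 2147483648) ∧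
                    (-2147483648 ≤ q.1.2 ∧ q.1.2 ≤ 2147483648)) :
    PySem.List.sorted2 xs (fun q => q.1.1) (fun q => q.1.2)
      = PySem.List.sorted xs pvKey := by
  simp only [PySem.List.sorted2, PySem.List.sorted, Bool.false_eq_true, if_false]
  refine pvFoldl_insertBy_congr _ _
    (fun q => (-2147483648 ≤ q.1.1 ∧ q.1.1 ≤ 2147483648) ∧
              (-2147483648 ≤ q.1.2 ∧ q.1.2 ≤ 2147483648))
    ?_ xs [] hb (by simp)
  intro a b ha hb'
  obtain ⟨⟨ha1l, ha1r⟩, ha2l, ha2r⟩ := ha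
  obtain ⟨⟨hb1l, hb1r⟩, hb2l, hb2r⟩ := hb'
  by_cases h1 : a.1.1 < b.1.1
  · have hk : pvKey a < pvKey b := by unfold pvKey; omega
    simp [h1, hk]
  · by_cases h2 : b.1.1 < a.1.1
    · have hk : ¬ pvKey a < pvKey b := by unfold pvKey; omega
      simp [h1, h2, hk]
    · have he : a.1.1 = b.1.1 := le_antisymm (not_lt.mp h2) (not_lt.mp h1)
      by_cases h3 : a.1.2 < b.1.2
      · have hk : pvKey a < pvKey b := by unfold pvKey; omega
        simp [h1, h2, h3, hk]
      · have hk : ¬ pvKey a < pvKey b := by unfold pvKey; omega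
        simp [h1, h2, h3, hk]

-- ===== VERDICT (by name: the statement is the Claim_ definition above) =====
theorem build_pairwise_map_py_spec : Claim_equal_build_pairwise_map_py := by
  intro r hdom
  unfold Spec_build_pairwise_map_py
  have hdom' : ∀ x ∈ r, -2147483648 ≤ x ∧ x ≤ 2147483648 := by
    unfold Dom_build_pairwise_map_py at hdom
    simpa [List.all_eq_true, pvDomInt] using hdom
  set S : List Int := PySem.List.sorted r (fun x => x) with hSdef
  have hSperm : S.Perm r := PySem.List.sorted_perm r (fun x => x) false
  have hSpw : S.Pairwise (· ≤ ·) := PySem.List.sorted_pairwise r (fun x => x)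
  set RP : PySem.Dict Int Int :=
    (PySem.List.enumerate r 0).foldl (fun d p => d.insert p.2 p.1) PySem.Dict.empty with hRPdef
  have hrp : ∀ x : Int, RP.getD x 0 = pvPos r x := by
    intro x
    have h1 : RP = ((PySem.List.enumerate r 0).map (fun p => (p.2, p.1))).foldl
        (fun d q => d.insert q.1 q.2) PySem.Dict.empty := by
      rw [hRPdef, List.foldl_map]
    rw [h1, pvDict_getD_foldl, List.foldl_map]
    rfl
  -- the pair-level entry lists
  set LA : List ((Int × Int) × Int) := pvPairs
    (fun a b => ((a, b), if RP.getD a 0 < RP.getD b 0 then a else b)) S with hLAdef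
  set KA : List (Int × Int) := pvPairs (fun a b => (a, b)) S with hKAdef
  set JB : List ((Int × Int) × Int) := pvPairs (fun w l => (pvSp w l, w)) r with hJBdef
  set KB : List (Int × Int) := pvPairs pvSp r with hKBdef
  set CP : List ((Int × Int) × Int) :=
    (PySem.Set.ofList KA).map (fun k => (k, pvWin r k)) with hCPdef
  ----------------------------------------------------------------
  -- A-side: build_pairwise_map_py r = CP.map (fun q => (pvEnc q.1, q.2))
  ----------------------------------------------------------------
  have hA1 : build_pairwise_map_py r
      = ((LA.map (fun q => (pvEnc q.1, q.2))).foldl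
          (fun d p => d.insert p.1 p.2) PySem.Dict.empty).items := by
    have hmap : LA.map (fun q => (pvEnc q.1, q.2))
        = pvPairs (fun a b => (pvEnc (a, b),
            if RP.getD a 0 < RP.getD b 0 then a else b)) S := by
      rw [hLAdef, pvPairs_map]
    rw [hmap]
    show (((PySem.List.enumerate S 0).foldl (fun d p =>
        (PySem.List.slice S (some (p.1 + 1)) none).foldl
          (fun d b => d.insert
            ((fun a b => (pvEnc (a, b), if RP.getD a 0 < RP.getD b 0 then a else b)) p.2 b).1
            ((fun a b => (pvEnc (a, b), if RP.getD a 0 < RP.getD b 0 then a else b)) p.2 b).2) d)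
        PySem.Dict.empty)).items = _
    rw [pvNested_foldl S
      (fun a b => (pvEnc (a, b), if RP.getD a 0 < RP.getD b 0 then a else b))
      PySem.Dict.empty]
  have hA2 : build_pairwise_map_py r
      = ((LA.foldl (fun d p => d.insert p.1 p.2) PySem.Dict.empty).items).map
          (fun q => (pvEnc q.1, q.2)) := by
    rw [hA1, List.foldl_map]
    exact pvDict_items_foldl_map pvEnc pvEnc_inj LA PySem.Dict.empty PySem.Dict.empty rfl
  have hLAfst : LA.map Prod.fst = KA := by
    rw [hLAdef, pvPairs_map, hKAdef]
  have hA3 : (LA.foldl (fun d p => d.insert p.1 p.2) PySem.Dict.empty).items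
      = (PySem.Set.ofList KA).map (fun k => (k, pvLast LA k 0)) := by
    rw [pvDict_items_foldl LA PySem.Dict.empty [] (fun _ => 0) rfl, hLAfst,
      ← PySem.Set.ofList_eq_foldl]
    rfl
  have hA4 : ∀ k ∈ PySem.Set.ofList KA, pvLast LA k 0 = pvWin r k := by
    intro k hk
    have hk' : k ∈ LA.map Prod.fst := by rw [hLAfst]; exact ((PySem.Set.mem_ofList _ _).mp hk)
    have hval : ∀ p ∈ LA, p.2 = (fun k : Int × Int =>
        if RP.getD k.1 0 < RP.getD k.2 0 then k.1 else k.2) p.1 := by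
      intro p hp
      obtain ⟨a, b, _, _, rfl⟩ := pvPairs_mem _ S p (hLAdef ▸ hp)
      rfl
    rw [pvLast_valfun LA (fun k : Int × Int =>
        if RP.getD k.1 0 < RP.getD k.2 0 then k.1 else k.2) hval k 0 hk']
    rw [hrp, hrp]
    rfl
  have hA : build_pairwise_map_py r = CP.map (fun q => (pvEnc q.1, q.2)) := by
    rw [hA2, hA3, hCPdef]
    congr 1
    exact List.map_congr_left (fun k hk => by rw [hA4 k hk])
  ----------------------------------------------------------------
  -- B-side
  ----------------------------------------------------------------
  set W : PySem.Dict (Int × Int) Int :=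
    (PySem.List.enumerate r 0).foldl (fun d p =>
      (PySem.List.slice r (some (p.1 + 1)) none).foldl (fun d l =>
        d.insert (if p.2 ≤ l then (p.2, l) else (l, p.2)) p.2) d)
      PySem.Dict.empty with hWdef
  have hJBfst : JB.map Prod.fst = KB := by
    rw [hJBdef, pvPairs_map, hKBdef]
  have hB1 : W = JB.foldl (fun d p => d.insert p.1 p.2) PySem.Dict.empty := by
    rw [hWdef, hJBdef]
    show ((PySem.List.enumerate r 0).foldl (fun d p =>
        (PySem.List.slice r (some (p.1 + 1)) none).foldl
          (fun d l => d.insert ((fun w l => (pvSp w l, w)) p.2 l).1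
            ((fun w l => (pvSp w l, w)) p.2 l).2) d) PySem.Dict.empty) = _
    rw [pvNested_foldl r (fun w l => (pvSp w l, w)) PySem.Dict.empty]
  have hB2 : W.items = (PySem.Set.ofList KB).map (fun k => (k, pvWin r k)) := by
    rw [hB1, pvDict_items_foldl JB PySem.Dict.empty [] (fun _ => 0) rfl, hJBfst,
      ← PySem.Set.ofList_eq_foldl]
    apply List.map_congr_left
    intro k hk
    have hocc : pvOcc r k := (pvMem_pairs_sp r k).mp ((PySem.Set.mem_ofList _ _).mp hk)
    have : pvLast JB k 0 = pvWin r k := by rw [hJBdef]; exact pvLast_J r k hocc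
    rw [← this]
    rfl
  -- same key sets
  have hkeysiff : ∀ k, k ∈ PySem.Set.ofList KB ↔ k ∈ PySem.Set.ofList KA := by
    intro k
    rw [PySem.Set.mem_ofList, PySem.Set.mem_ofList, hKBdef, hKAdef, pvMem_pairs_sp,
      pvMem_pairs_id S hSpw, pvOcc_perm hSperm]
  have hperm : (PySem.Set.ofList KA).Perm (PySem.Set.ofList KB) :=
    (List.perm_ext_iff_of_nodup (PySem.Set.nodup_ofList _) (PySem.Set.nodup_ofList _)).mpr
      (fun a => (hkeysiff a).symm)
  -- bounds
  have hboundKA : ∀ k ∈ PySem.Set.ofList KA,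
      (-2147483648 ≤ k.1 ∧ k.1 ≤ 2147483648) ∧ (-2147483648 ≤ k.2 ∧ k.2 ≤ 2147483648) := by
    intro k hk
    have hocc : pvOcc r k := (pvOcc_perm hSperm k).mp
      ((pvMem_pairs_id S hSpw k).mp ((PySem.Set.mem_ofList _ _).mp hk))
    have hmem : k.1 ∈ r ∧ k.2 ∈ r := by
      rcases hocc with ⟨_, ha, hb⟩ | ⟨hab, hcnt⟩
      · exact ⟨ha, hb⟩
      · have h := List.count_pos_iff.mp (show 0 < r.count k.1 by omega)
        exact ⟨h, hab ▸ h⟩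
    exact ⟨hdom' _ hmem.1, hdom' _ hmem.2⟩
  -- CP is strictly sorted under pvKey
  have hlex : (PySem.Set.ofList KA).Pairwise pvLex := hKAdef ▸ pvKA_pairwise S hSpw
  have hkeypw : CP.Pairwise (fun q q' => pvKey q < pvKey q') := by
    rw [hCPdef]
    rw [List.pairwise_map]
    refine List.Pairwise.imp_of_mem ?_ hlex
    intro k k' hk hk' hl
    have b1 := hboundKA k hk
    have b2 := hboundKA k' hk'
    unfold pvKey
    dsimp only
    rcases hl with h | ⟨he, h⟩ <;> omega
  have hCPperm : CP.Perm W.items := by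
    rw [hB2, hCPdef]
    exact hperm.map _
  have hsort : PySem.List.sorted2 W.items (fun q => q.1.1) (fun q => q.1.2) = CP := by
    rw [pvSorted2_eq_sorted W.items ?_]
    · exact PySem.List.sorted_eq_of_perm_of_pairwise_lt W.items CP pvKey hCPperm hkeypw
    · intro q hq
      rw [hB2] at hq
      obtain ⟨k, hk, rfl⟩ := List.mem_map.mp hq
      have hb := hboundKA k ((hkeysiff k).mp hk)
      exact hb
  -- assemble B
  have hfresh : ∀ q ∈ CP, (PySem.Dict.empty : PySem.Dict String Int).contains (pvEnc q.1) = false := by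
    intro q _
    exact PySem.Dict.contains_empty _
  have hnodup : (CP.map (fun q => pvEnc q.1)).Nodup := by
    rw [hCPdef, List.map_map]
    exact (PySem.Set.nodup_ofList _).map
      (fun a b h => pvEnc_inj (show pvEnc a = pvEnc b from h))
  have hB : build_pairwise_map_py_alt r = CP.map (fun q => (pvEnc q.1, q.2)) := by
    show ((PySem.List.sorted2 W.items (fun q => q.1.1) (fun q => q.1.2)).foldl
        (fun d q => d.insert (pvEnc q.1) q.2) PySem.Dict.empty).items = _
    rw [hsort, PySem.Dict.items_foldl_insert_fresh CP (fun q => pvEnc q.1) (fun q => q.2)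
      PySem.Dict.empty hfresh hnodup]
    rfl
  rw [hA, hB]
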